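-- pv_equiv track=rewrite | github.com/HOZH/leetCode | leetCodePython2020/1328.break-a-palindrome.py | breakPalindrome
-- ===== SOURCE A (Python) =====
-- def breakPalindrome(palindrome: str) -> str:
--
--     def helper(index):
--         left, right = palindrome[:index], palindrome[index+1:]
--         if left == right:
--             return ''
--         prev = palindrome[index]
--         return left+('a' if prev != 'a' else 'b')+right
--
--     length = len(palindrome)
--     if length == 1:
--         return ''
--     ans = 'z'*length
--     for i in range(length):
--         temp = helper(i)
--         if len(temp) > 0:
--             ans = min(ans, helper(i))
--     return ans
-- ===== SOURCE B (Python) =====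
-- def breakPalindrome(palindrome: str) -> str:
--     n = len(palindrome)
--     if n < 2:
--         return ''
--     mid = n // 2
--     skip = n % 2 == 1 and palindrome[:mid] == palindrome[mid + 1:]
--     for i, ch in enumerate(palindrome):
--         if ch > 'a' and not (skip and i == mid):
--             return palindrome[:i] + 'a' + palindrome[i + 1:]
--     last = palindrome[-1]
--     return palindrome[:-1] + ('b' if last == 'a' else 'a')
-- ===== Notes on version B (the rewrite author's own statement) =====
-- stated objective: faster
-- what changed: A builds every one-character edit and takes a lexicographic minimum over all positions (quadratic); B does a single scan: it rewrites the first character above 'a' (skipping the middle position A's left==right test skips) to 'a', and otherwise edits the last character.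
import Mathlib
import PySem

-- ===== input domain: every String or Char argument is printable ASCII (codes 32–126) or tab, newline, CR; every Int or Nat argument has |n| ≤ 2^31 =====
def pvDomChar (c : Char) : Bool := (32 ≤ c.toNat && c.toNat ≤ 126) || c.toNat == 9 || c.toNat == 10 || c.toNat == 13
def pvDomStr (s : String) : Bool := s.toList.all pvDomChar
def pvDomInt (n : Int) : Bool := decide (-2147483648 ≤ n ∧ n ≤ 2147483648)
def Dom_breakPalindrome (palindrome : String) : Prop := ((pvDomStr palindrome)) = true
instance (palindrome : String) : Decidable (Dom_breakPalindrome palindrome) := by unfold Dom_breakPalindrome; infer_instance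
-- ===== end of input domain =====

-- B replaces A's quadratic scan over all single-character edits with a single O(n) pass
-- (lower the first lowerable character, else edit the last); objective: faster.

-- ===== PORT A =====
-- helper(index) of A: slices, the left == right skip test, and the replaced character
def bpHelper (l : List Char) (index : Int) : List Char :=
  let left := PySem.List.slice l none (some index)
  let right := PySem.List.slice l (some (index + 1)) none
  if left = right then []
  else
    let prev := PySem.List.pyGetD l index ' '
    left ++ (if prev ≠ 'a' then 'a' else 'b') :: right

def breakPalindrome (palindrome : String) : String :=
  let l := palindrome.toList
  let length := l.length
  if length = 1 then ""
  else
    String.mk ((PySem.List.pyRange 0 (length : Int) 1).foldl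
      (fun ans i =>
        let temp := bpHelper l i
        if 0 < temp.length then min ans (bpHelper l i) else ans)
      (List.replicate length 'z'))

-- ===== PORT B =====
-- B's scan: first index i with l[i] > 'a' that is not the skipped middle
def bpFind (skip : Bool) (mid : Nat) (i : Nat) : List Char → Option Nat
  | [] => none
  | c :: rest => if 'a' < c && !(skip && i == mid) then some i else bpFind skip mid (i + 1) rest

def breakPalindrome_alt (palindrome : String) : String :=
  let l := palindrome.toList
  let n := l.length
  if n < 2 then ""
  else
    let mid := n / 2
    let skip := decide (n % 2 = 1) && (l.take mid == l.drop (mid + 1))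
    match bpFind skip mid 0 l with
    | some i => String.mk (l.take i ++ 'a' :: l.drop (i + 1))
    | none =>
      let last := PySem.List.pyGetD l (-1) ' '
      String.mk (l.dropLast ++ [if last = 'a' then 'b' else 'a'])

-- ===== PRECONDITION & SPEC =====
def Spec_breakPalindrome (palindrome : String) (out : String) : Prop := out = breakPalindrome_alt palindrome
instance (palindrome : String) (out : String) : Decidable (Spec_breakPalindrome palindrome out) := by unfold Spec_breakPalindrome; infer_instance

-- ===== CLAIM (what is proved, stated in full; the proofs are below) =====
def Claim_equal_breakPalindrome : Prop := ∀ (palindrome : String), Dom_breakPalindrome palindrome → Spec_breakPalindrome palindrome (breakPalindrome palindrome)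

-- ===== LEMMAS AND PROOFS =====

-- the candidate string produced by editing position k (A's helper value when not skipped)
def pvCand (l : List Char) (k : Nat) : List Char :=
  l.take k ++ (if l.getD k ' ' ≠ 'a' then 'a' else 'b') :: l.drop (k + 1)

-- lexicographic order: same prefix, smaller character ⇒ smaller list
theorem pvLexLt {p u v : List Char} {a b : Char} (h : a < b) : p ++ a :: u < p ++ b :: v := by
  show List.Lex _ _ _
  exact List.Lex.append_left _ (List.Lex.rel h) p

-- decompose a take at an inner position
theorem pvTakeDecomp (l : List Char) (i k : Nat) (h1 : i < k) (h2 : k ≤ l.length) :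
    l.take k = l.take i ++ l.getD i ' ' :: (l.drop (i + 1)).take (k - i - 1) := by
  have hi : i < l.length := lt_of_lt_of_le h1 h2
  obtain ⟨m, rfl⟩ : ∃ m, k = i + (m + 1) := ⟨k - i - 1, by omega⟩
  have hm : i + (m + 1) - i - 1 = m := by omega
  rw [hm, List.take_add, List.drop_eq_getElem_cons hi, List.getD_eq_getElem l ' ' hi,
      List.take_succ_cons]

-- lexicographic order, at the head
theorem pvLexLtCons {u v : List Char} {a b : Char} (h : a < b) : a :: u < b :: v := by
  simpa using pvLexLt (p := ([] : List Char)) (u := u) (v := v) h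

theorem pvCand_lt_cand_low (l : List Char) (i k : Nat) (hik : i < k) (hk : k ≤ l.length)
    (hi : 'a' < l.getD i ' ') : pvCand l i < pvCand l k := by
  have hne : l.getD i ' ' ≠ 'a' := fun h => by rw [h] at hi; exact lt_irrefl _ hi
  unfold pvCand
  rw [pvTakeDecomp l i k hik hk, if_pos hne, List.append_assoc, List.cons_append]
  exact pvLexLt hi

theorem pvCand_lt_cand_high (l : List Char) (i k : Nat) (hki : k < i) (hi : i ≤ l.length)
    (hk : l.getD k ' ' ≤ 'a') : pvCand l i < pvCand l k := by
  have hrep : l.getD k ' ' < (if l.getD k ' ' ≠ 'a' then 'a' else 'b') := by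
    rcases eq_or_lt_of_le hk with h | h
    · rw [h]; decide
    · rw [if_pos (ne_of_lt h)]; exact h
  unfold pvCand
  rw [pvTakeDecomp l k i hki hi, List.append_assoc, List.cons_append]
  exact pvLexLt hrep

theorem pvCand_lt_init (l : List Char) (i : Nat) (hi : i < l.length)
    (h0 : i = 0 ∨ l.getD 0 ' ' < 'z') : pvCand l i < List.replicate l.length 'z' := by
  have hn : l.length = (l.length - 1) + 1 := by omega
  have hrepl : List.replicate l.length 'z' = 'z' :: List.replicate (l.length - 1) 'z' := by
    conv_lhs => rw [hn]
    rw [List.replicate_succ]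
  rw [hrepl]
  rcases Nat.eq_zero_or_pos i with rfl | hi0
  · unfold pvCand
    rw [List.take_zero, List.nil_append]
    apply pvLexLtCons
    split_ifs <;> decide
  · have hz : l.getD 0 ' ' < 'z' := h0.resolve_left (by omega)
    unfold pvCand
    rw [pvTakeDecomp l 0 i hi0 (le_of_lt hi), List.take_zero, List.nil_append, List.cons_append]
    exact pvLexLtCons hz

-- generic fold-min characterisation: the fold keeps a running minimum
theorem pvFoldMinConst {α : Type} [LinearOrder α] (f : Nat → α) (Q : Nat → Prop) [DecidablePred Q]
    (r : α) : ∀ (ks : List Nat), (∀ k ∈ ks, ¬ Q k → r ≤ f k) →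
    ks.foldl (fun a k => if Q k then a else min a (f k)) r = r
  | [], _ => rfl
  | k :: t, h => by
    by_cases hq : Q k
    · simp only [List.foldl_cons, if_pos hq]
      exact pvFoldMinConst f Q r t (fun j hj => h j (List.mem_cons_of_mem _ hj))
    · simp only [List.foldl_cons, if_neg hq, min_eq_left (h k (List.mem_cons_self) hq)]
      exact pvFoldMinConst f Q r t (fun j hj => h j (List.mem_cons_of_mem _ hj))

theorem pvFoldMinEq {α : Type} [LinearOrder α] (f : Nat → α) (Q : Nat → Prop) [DecidablePred Q] (r : α) :
    ∀ (ks : List Nat) (init : α), (∃ k ∈ ks, ¬ Q k ∧ f k = r) → r ≤ init →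
    (∀ k ∈ ks, ¬ Q k → r ≤ f k) →
    ks.foldl (fun a k => if Q k then a else min a (f k)) init = r
  | [], _, hmem, _, _ => by simp at hmem
  | k :: t, init, hmem, hinit, hlb => by
    by_cases hq : Q k
    · simp only [List.foldl_cons, if_pos hq]
      rcases hmem with ⟨j, hj, hnq, hfj⟩
      rcases List.mem_cons.mp hj with rfl | hj'
      · exact absurd hq hnq
      · exact pvFoldMinEq f Q r t init ⟨j, hj', hnq, hfj⟩ hinit
          (fun j hj hnq => hlb j (List.mem_cons_of_mem _ hj) hnq)
    · simp only [List.foldl_cons, if_neg hq]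
      rcases hmem with ⟨j, hj, hnq, hfj⟩
      rcases List.mem_cons.mp hj with rfl | hj'
      · rw [hfj, min_eq_right hinit]
        exact pvFoldMinConst f Q r t (fun j hj hnq => hlb j (List.mem_cons_of_mem _ hj) hnq)
      · have hr : r ≤ min init (f k) :=
          le_min hinit (hlb k (List.mem_cons_self) hq)
        exact pvFoldMinEq f Q r t (min init (f k)) ⟨j, hj', hnq, hfj⟩ hr
          (fun j hj hnq => hlb j (List.mem_cons_of_mem _ hj) hnq)

-- A's skip test characterised: it only fires at the middle of an odd-length list
theorem pvSkipIff (l : List Char) (k : Nat) (hk : k < l.length) :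
    l.take k = l.drop (k + 1) ↔
      (l.length % 2 = 1 ∧ l.take (l.length / 2) = l.drop (l.length / 2 + 1) ∧ k = l.length / 2) := by
  constructor
  · intro h
    have hlen : (l.take k).length = (l.drop (k + 1)).length := by rw [h]
    simp only [List.length_take, List.length_drop] at hlen
    have hk2 : k = l.length / 2 ∧ l.length % 2 = 1 := by omega
    exact ⟨hk2.2, hk2.1 ▸ h, hk2.1⟩
  · rintro ⟨_, heq, rfl⟩
    exact heq

-- B's loop guard, read as a proposition
theorem pvCondIff {c : Char} {skip : Bool} {i mid : Nat} :
    ('a' < c && !(skip && i == mid)) = true ↔ ('a' < c ∧ ¬(skip = true ∧ i = mid)) := by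
  simp only [Bool.and_eq_true, decide_eq_true_eq, Bool.not_eq_true', Bool.and_eq_false_iff,
    beq_eq_false_iff_ne, ne_eq]
  constructor
  · rintro ⟨h1, h2⟩
    refine ⟨h1, ?_⟩
    rintro ⟨hs, hm⟩
    rcases h2 with h2 | h2
    · rw [hs] at h2; cases h2
    · exact h2 hm
  · rintro ⟨h1, h2⟩
    refine ⟨h1, ?_⟩
    by_cases hs : skip = true
    · exact Or.inr (fun hm => h2 ⟨hs, hm⟩)
    · exact Or.inl (by simpa using hs)

-- bpFind = none: no admissible position exists
theorem pvFindNone (skip : Bool) (mid : Nat) :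
    ∀ (l : List Char) (s : Nat), bpFind skip mid s l = none →
      ∀ k, k < l.length → ¬('a' < l.getD k ' ' ∧ ¬(skip = true ∧ s + k = mid))
  | [], _, _, k, hk => by simp at hk
  | c :: t, s, h, k, hk => by
    unfold bpFind at h
    by_cases hc : ('a' < c && !(skip && s == mid)) = true
    · rw [if_pos hc] at h; cases h
    · rw [if_neg hc] at h
      match k with
      | 0 =>
        rintro ⟨h1, h2⟩
        simp only [List.getD_cons_zero] at h1
        exact hc (pvCondIff.mpr ⟨h1, fun ⟨a, b⟩ => h2 ⟨a, by omega⟩⟩)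
      | k' + 1 =>
        rintro ⟨h1, h2⟩
        simp only [List.getD_cons_succ] at h1
        exact pvFindNone skip mid t (s + 1) h k' (by simpa using hk)
          ⟨h1, fun ⟨a, b⟩ => h2 ⟨a, by omega⟩⟩

-- bpFind = some i: i is the first admissible position
theorem pvFindSome (skip : Bool) (mid : Nat) :
    ∀ (l : List Char) (s i : Nat), bpFind skip mid s l = some i →
      s ≤ i ∧ i - s < l.length ∧ ('a' < l.getD (i - s) ' ' ∧ ¬(skip = true ∧ i = mid)) ∧
      ∀ j, j < i - s → ¬('a' < l.getD j ' ' ∧ ¬(skip = true ∧ s + j = mid))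
  | [], _, _, h => by simp [bpFind] at h
  | c :: t, s, i, h => by
    unfold bpFind at h
    by_cases hc : ('a' < c && !(skip && s == mid)) = true
    · rw [if_pos hc] at h
      have hi : i = s := by simpa using h.symm
      subst hi
      obtain ⟨h1, h2⟩ := pvCondIff.mp hc
      refine ⟨le_refl _, by simp, ⟨by simpa using h1, h2⟩, by omega⟩
    · rw [if_neg hc] at h
      obtain ⟨hs1, hlen, ⟨hlt, hmid⟩, hmin⟩ := pvFindSome skip mid t (s + 1) i h
      refine ⟨by omega, by simp; omega, ⟨?_, hmid⟩, ?_⟩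
      · have hd : i - s = (i - (s + 1)) + 1 := by omega
        rw [hd]; simpa using hlt
      · intro j hj
        match j with
        | 0 =>
          rintro ⟨h1, h2⟩
          simp only [List.getD_cons_zero] at h1
          exact hc (pvCondIff.mpr ⟨h1, fun ⟨a, b⟩ => h2 ⟨a, by omega⟩⟩)
        | j' + 1 =>
          rintro ⟨h1, h2⟩
          simp only [List.getD_cons_succ] at h1
          exact hmin j' (by omega) ⟨h1, fun ⟨a, b⟩ => h2 ⟨a, by omega⟩⟩

-- A's helper computed at a natural index
theorem pvHelperEq (l : List Char) (k : Nat) :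
    bpHelper l (k : Int) = if l.take k = l.drop (k + 1) then [] else pvCand l k := by
  unfold bpHelper pvCand
  have h1 : PySem.List.slice l none (some (k : Int)) = l.take k := PySem.List.slice_to_natCast l k
  have h2 : PySem.List.slice l (some ((k : Int) + 1)) none = l.drop (k + 1) := by
    have : (k : Int) + 1 = ((k + 1 : Nat) : Int) := by push_cast; ring
    rw [this, PySem.List.slice_from_natCast]
  have h3 : PySem.List.pyGetD l (k : Int) ' ' = l.getD k ' ' := by simp
  rw [h1, h2, h3]

-- A's loop, rewritten as a fold of candidates over List.range
theorem pvAFold (l : List Char) :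
    (PySem.List.pyRange 0 (l.length : Int) 1).foldl
      (fun ans i =>
        let temp := bpHelper l i
        if 0 < temp.length then min ans (bpHelper l i) else ans)
      (List.replicate l.length 'z') =
    (List.range l.length).foldl
      (fun ans k => if l.take k = l.drop (k + 1) then ans else min ans (pvCand l k))
      (List.replicate l.length 'z') := by
  rw [PySem.List.pyRange_one, List.foldl_map]
  have h : ((l.length : Int) - 0).toNat = l.length := by omega
  rw [h]
  apply PySem.List.foldl_congr_mem
  intro acc k _
  simp only [zero_add]
  rw [pvHelperEq]
  by_cases hq : l.take k = l.drop (k + 1)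
  · simp [hq]
  · rw [if_neg hq]
    have hlen : 0 < (pvCand l k).length := by
      unfold pvCand; simp
    rw [if_pos hlen, if_neg hq]

-- main list-level equivalence
theorem pvMain (s : String) : breakPalindrome s = breakPalindrome_alt s := by
  unfold breakPalindrome breakPalindrome_alt
  by_cases h0 : s.toList.length = 0
  · have hnil : s.toList = [] := List.eq_nil_of_length_eq_zero h0
    simp only [hnil]
    simp
    rfl
  by_cases h1 : s.toList.length = 1
  · simp [h1]
  · have hn : 2 ≤ s.toList.length := by omega
    rw [if_neg h1, if_neg (by omega : ¬ s.toList.length < 2)]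
    rw [pvAFold]
    simp only []
    have hskipIff : (decide (s.toList.length % 2 = 1) &&
        (s.toList.take (s.toList.length / 2) == s.toList.drop (s.toList.length / 2 + 1))) = true ↔
        (s.toList.length % 2 = 1 ∧
          s.toList.take (s.toList.length / 2) = s.toList.drop (s.toList.length / 2 + 1)) := by
      simp
    have hQiff : ∀ k, k < s.toList.length →
        (s.toList.take k = s.toList.drop (k + 1) ↔
          ((decide (s.toList.length % 2 = 1) &&
            (s.toList.take (s.toList.length / 2) == s.toList.drop (s.toList.length / 2 + 1))) = true ∧
            k = s.toList.length / 2)) := by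
      intro k hk
      rw [pvSkipIff s.toList k hk, hskipIff]
      constructor
      · rintro ⟨ha, hb, hc⟩; exact ⟨⟨ha, hb⟩, hc⟩
      · rintro ⟨⟨ha, hb⟩, hc⟩; exact ⟨ha, hb, hc⟩
    cases hfind : bpFind (decide (s.toList.length % 2 = 1) &&
        (s.toList.take (s.toList.length / 2) == s.toList.drop (s.toList.length / 2 + 1)))
        (s.toList.length / 2) 0 s.toList with
    | some i =>
      simp only []
      obtain ⟨-, hilen0, ⟨hgt0, hnotmid⟩, hmin0⟩ := pvFindSome _ _ s.toList 0 i hfind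
      have hilen : i < s.toList.length := by omega
      have hgt : 'a' < s.toList.getD i ' ' := by rw [Nat.sub_zero] at hgt0; exact hgt0
      have hmin : ∀ j, j < i → ¬('a' < s.toList.getD j ' ' ∧
          ¬((decide (s.toList.length % 2 = 1) &&
            (s.toList.take (s.toList.length / 2) == s.toList.drop (s.toList.length / 2 + 1))) = true ∧
            j = s.toList.length / 2)) := by
        intro j hj hx
        exact hmin0 j (by omega) ⟨hx.1, fun ⟨a, b⟩ => hx.2 ⟨a, by omega⟩⟩
      have hne : s.toList.getD i ' ' ≠ 'a' := fun h => by rw [h] at hgt; exact lt_irrefl _ hgt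
      have hBcand : s.toList.take i ++ 'a' :: s.toList.drop (i + 1) = pvCand s.toList i := by
        unfold pvCand; rw [if_pos hne]
      rw [hBcand]
      congr 1
      have hlow : ∀ j, j < i →
          ¬((decide (s.toList.length % 2 = 1) &&
            (s.toList.take (s.toList.length / 2) == s.toList.drop (s.toList.length / 2 + 1))) = true ∧
            j = s.toList.length / 2) → s.toList.getD j ' ' ≤ 'a' := by
        intro j hj hnm
        by_contra hgt'
        exact hmin j hj ⟨lt_of_not_ge (fun h => hgt' h), hnm⟩
      apply pvFoldMinEq (pvCand s.toList) (fun k => s.toList.take k = s.toList.drop (k + 1))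
        (pvCand s.toList i)
      · exact ⟨i, List.mem_range.mpr hilen, fun h => hnotmid ((hQiff i hilen).mp h), rfl⟩
      · apply le_of_lt
        apply pvCand_lt_init s.toList i hilen
        by_cases hi0 : i = 0
        · exact Or.inl hi0
        · right
          have hle : s.toList.getD 0 ' ' ≤ 'a' := by
            apply hlow 0 (by omega)
            rintro ⟨-, h0m⟩
            omega
          exact lt_of_le_of_lt hle (by decide)
      · intro k hk hq
        have hkn : k < s.toList.length := List.mem_range.mp hk
        have hvalid : ¬((decide (s.toList.length % 2 = 1) &&
            (s.toList.take (s.toList.length / 2) == s.toList.drop (s.toList.length / 2 + 1))) = true ∧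
            k = s.toList.length / 2) := fun h => hq ((hQiff k hkn).mpr h)
        rcases lt_trichotomy k i with hki | rfl | hik
        · exact le_of_lt (pvCand_lt_cand_high s.toList i k hki (le_of_lt hilen) (hlow k hki hvalid))
        · exact le_refl _
        · exact le_of_lt (pvCand_lt_cand_low s.toList i k hik (le_of_lt hkn) hgt)
    | none =>
      simp only []
      have hnone := pvFindNone _ _ s.toList 0 hfind
      have hlow : ∀ j, j < s.toList.length →
          ¬((decide (s.toList.length % 2 = 1) &&
            (s.toList.take (s.toList.length / 2) == s.toList.drop (s.toList.length / 2 + 1))) = true ∧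
            j = s.toList.length / 2) → s.toList.getD j ' ' ≤ 'a' := by
        intro j hj hnm
        by_contra hgt'
        exact hnone j hj ⟨lt_of_not_ge (fun h => hgt' h), fun ⟨a, b⟩ => hnm ⟨a, by omega⟩⟩
      have hlne : s.toList ≠ [] := by
        intro h; rw [h] at hn; simp at hn
      have hlast : PySem.List.pyGetD s.toList (-1) ' ' = s.toList.getD (s.toList.length - 1) ' ' := by
        rw [PySem.List.pyGetD_neg_one s.toList ' ' hlne, List.getLast_eq_getElem,
            List.getD_eq_getElem s.toList ' ' (by omega)]
      have hBcand : s.toList.dropLast ++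
          [if PySem.List.pyGetD s.toList (-1) ' ' = 'a' then 'b' else 'a'] =
          pvCand s.toList (s.toList.length - 1) := by
        unfold pvCand
        rw [List.dropLast_eq_take, hlast]
        have hdrop : s.toList.drop ((s.toList.length - 1) + 1) = [] := by
          apply List.drop_eq_nil_of_le; omega
        rw [hdrop]
        simp only [ne_eq, ite_not]
      rw [hBcand]
      congr 1
      have hlastvalid : ¬((decide (s.toList.length % 2 = 1) &&
          (s.toList.take (s.toList.length / 2) == s.toList.drop (s.toList.length / 2 + 1))) = true ∧
          s.toList.length - 1 = s.toList.length / 2) := by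
        rintro ⟨hs, hm⟩
        have := hskipIff.mp hs
        omega
      apply pvFoldMinEq (pvCand s.toList) (fun k => s.toList.take k = s.toList.drop (k + 1))
        (pvCand s.toList (s.toList.length - 1))
      · exact ⟨s.toList.length - 1, List.mem_range.mpr (by omega),
          fun h => hlastvalid ((hQiff (s.toList.length - 1) (by omega)).mp h), rfl⟩
      · apply le_of_lt
        apply pvCand_lt_init s.toList (s.toList.length - 1) (by omega)
        right
        have hle : s.toList.getD 0 ' ' ≤ 'a' := by
          apply hlow 0 (by omega)
          rintro ⟨-, h0m⟩
          omega
        exact lt_of_le_of_lt hle (by decide)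
      · intro k hk hq
        have hkn : k < s.toList.length := List.mem_range.mp hk
        have hvalid : ¬((decide (s.toList.length % 2 = 1) &&
            (s.toList.take (s.toList.length / 2) == s.toList.drop (s.toList.length / 2 + 1))) = true ∧
            k = s.toList.length / 2) := fun h => hq ((hQiff k hkn).mpr h)
        rcases lt_trichotomy k (s.toList.length - 1) with hki | heq | hik
        · exact le_of_lt (pvCand_lt_cand_high s.toList (s.toList.length - 1) k hki (by omega)
            (hlow k (by omega) hvalid))
        · rw [heq]
        · omega

-- ===== VERDICT (by name: the statement is the Claim_ definition above) =====
theorem breakPalindrome_spec : Claim_equal_breakPalindrome := by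
  intro palindrome _
  unfold Spec_breakPalindrome
  exact pvMain palindrome
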